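-- pv_equiv track=rewrite | github.com/MarkSon-42/Team_ALGO | hyungjoon/프로그래머스/레벨 2/230627_프로그래머스_12980_점프와 순간 이동/failed.py | solution
-- ===== SOURCE A (Python) =====
-- def solution(n):
--     ans = 0
--     # 1. 10억이라 완탐이 안되니 수를 줄여보자
--     # 2. 건전지는 최소 1임
--     # 이게 top-down DP인가..?
--
--     # 현재까지 온 거리 * 2 * 2 한게 n보다 크다면
--     # 그 자리에서 점프를 하는게 더 효율적이다.
--     for i in range(n):
--         if i == 0:
--             ans += 1
--             continue
--
--         if i*2 == n:
--             return ans
--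
--         if i*2*2 + ans > n:
--             ans += 1
--             continue
--         else:
--             i *= 2
--
--     return ans
-- ===== SOURCE B (Python) =====
-- def solution(n):
--     # Closed form of the loop: ans stays 1 while 4*i + 1 <= n, then
--     # increments once per iteration; even n returns early at i == n // 2.
--     if n <= 0:
--         return 0
--     i1 = (n - 1) // 4
--     if n % 2 == 0:
--         return n // 2 - i1
--     return n - i1
-- ===== Notes on version B (the rewrite author's own statement) =====
-- stated objective: faster
-- what changed: Replaced the O(n) loop with early return by an O(1) closed-form arithmetic expression derived from the loop's two-phase behaviour (ans stays 1 while 4i+1<=n, then increments each step; even n returns at i=n/2).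
import Mathlib
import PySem

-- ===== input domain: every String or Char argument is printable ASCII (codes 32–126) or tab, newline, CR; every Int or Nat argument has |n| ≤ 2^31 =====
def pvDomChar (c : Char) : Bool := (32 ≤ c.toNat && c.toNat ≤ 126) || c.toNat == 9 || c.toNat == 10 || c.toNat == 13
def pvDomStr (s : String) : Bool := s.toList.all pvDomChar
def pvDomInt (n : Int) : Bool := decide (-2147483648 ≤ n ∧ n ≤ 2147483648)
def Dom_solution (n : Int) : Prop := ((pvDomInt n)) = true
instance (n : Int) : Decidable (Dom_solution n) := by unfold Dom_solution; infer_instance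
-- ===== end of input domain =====

-- B replaces A's O(n) loop by an O(1) closed-form arithmetic expression (same value everywhere).

-- ===== PORT A =====
-- the 'for i in range(n)' loop with early returns, transcribed as structural recursion over the range list
def solutionLoop (n : Int) : List Int → Int → Int
  | [], ans => ans
  | i :: rest, ans =>
    if i = 0 then solutionLoop n rest (ans + 1)
    else if i * 2 = n then ans
    else if i * 2 * 2 + ans > n then solutionLoop n rest (ans + 1)
    else
      -- Python: 'i *= 2' — rebinds the loop variable only, no effect on later iterations
      solutionLoop n rest ans

def solution (n : Int) : Int :=
  solutionLoop n (PySem.List.pyRange 0 n 1) 0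

-- ===== PORT B =====
def solution_alt (n : Int) : Int :=
  if n ≤ 0 then 0
  else
    let i1 := PySem.Int.floordiv (n - 1) 4
    if PySem.Int.mod n 2 = 0 then PySem.Int.floordiv n 2 - i1
    else n - i1

-- ===== PRECONDITION & SPEC =====
def Spec_solution (n : Int) (out : Int) : Prop := out = solution_alt n
instance (n : Int) (out : Int) : Decidable (Spec_solution n out) := by unfold Spec_solution; infer_instance

-- ===== CLAIM (what is proved, stated in full; the proofs are below) =====
def Claim_equal_solution : Prop := ∀ (n : Int), Dom_solution n → Spec_solution n (solution n)

-- ===== LEMMAS AND PROOFS =====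

-- loop invariant: from iteration k on (1 ≤ k ≤ n, and k ≤ n/2 if n is even since the loop
-- returns at i = n/2), with ans = max 1 (k - (n-1)/4), the loop yields the closed form.
theorem solutionLoop_inv (n : Int) (hn : 1 ≤ n) :
    ∀ (m : Nat) (k : Int), 1 ≤ k → k ≤ n → (n % 2 = 0 → 2 * k ≤ n) → n - k = (m : Int) →
      solutionLoop n (PySem.List.pyRange k n 1) (max 1 (k - (n - 1) / 4)) =
        if n % 2 = 0 then n / 2 - (n - 1) / 4 else n - (n - 1) / 4 := by
  intro m
  induction m with
  | zero =>
    intro k hk1 hkn hhalf hm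
    have hk : k = n := by omega
    rw [hk, PySem.List.pyRange_one_eq_nil (le_refl n), solutionLoop]
    have hodd : ¬ n % 2 = 0 := by intro h; have := hhalf h; omega
    rw [if_neg hodd, max_eq_right (by omega)]
  | succ m ih =>
    intro k hk1 hkn hhalf hm
    have hklt : k < n := by omega
    rw [PySem.List.pyRange_one_cons hklt, solutionLoop, if_neg (by omega : ¬ k = 0)]
    set q : Int := (n - 1) / 4 with hq
    by_cases heven : k * 2 = n
    · rw [if_pos heven, if_pos (by omega : n % 2 = 0), max_eq_right (by omega)]
      omega
    · rw [if_neg heven]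
      by_cases hc : k * 2 * 2 + max 1 (k - q) > n
      · rw [if_pos hc]
        have hki : q + 1 ≤ k := by
          by_contra h
          rw [max_eq_left (by omega)] at hc
          omega
        have H := ih (k + 1) (by omega) (by omega) (by omega) (by omega)
        rw [max_eq_right (by omega : (1:Int) ≤ k + 1 - q)] at H
        rw [max_eq_right (by omega : (1:Int) ≤ k - q),
            show k - q + 1 = k + 1 - q from by omega]
        exact H
      · rw [if_neg hc]
        have hki : k ≤ q := by
          by_contra h
          rw [max_eq_right (by omega)] at hc
          omega
        have H := ih (k + 1) (by omega) (by omega) (by omega) (by omega)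
        rw [max_eq_left (by omega : k + 1 - q ≤ (1:Int))] at H
        rw [max_eq_left (by omega : k - q ≤ (1:Int))]
        exact H

-- ===== VERDICT (by name: the statement is the Claim_ definition above) =====
theorem solution_spec : Claim_equal_solution := by
  intro n _
  unfold Spec_solution solution solution_alt
  by_cases hn : n ≤ 0
  · rw [if_pos hn, PySem.List.pyRange_one_eq_nil hn, solutionLoop]
  · rw [if_neg hn,
        PySem.Int.mod_eq_emod_of_pos (by norm_num : (0:Int) < 2),
        PySem.Int.floordiv_eq_ediv_of_pos (by norm_num : (0:Int) < 4),
        PySem.Int.floordiv_eq_ediv_of_pos (by norm_num : (0:Int) < 2),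
        PySem.List.pyRange_one_cons (by omega : (0:Int) < n), solutionLoop, if_pos rfl]
    have H := solutionLoop_inv n (by omega) (n - 1).toNat 1 (by omega) (by omega)
      (by omega) (by omega)
    rw [max_eq_left (by omega : 1 - (n - 1) / 4 ≤ (1:Int))] at H
    simpa using H
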